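-- pv_equiv track=rewrite | github.com/Yoshod/Sersi | cogs/community/jokes.py | generate_uwu
-- ===== SOURCE A (Python) =====
-- def generate_uwu(input_text: str) -> str:
--     """Will convert input text into uwuified text.
--
--     Replaces specific characters with their uwu equivalents,
--     and inserts "yo" or "ya" after "o" or "a" if the previous
--     character is "n", "m", "N", or "M". Returns the uwuified text.
--
--     Shamelessly stolen from https://www.geeksforgeeks.org/uwu-text-convertor-in-python/.
--     well, I modified it.
--     """
--
--     output_text = ""
--     previous_char = "\0"
--     # check the cases for every individual character
--     for current_char in input_text:
--         # change 'L' and 'R' to 'W'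
--         if current_char in ["L", "R"]:
--             output_text += "W"
--
--         # change 'l' and 'r' to 'w'
--         elif current_char in ["l", "r"]:
--             output_text += "w"
--
--         # if the current character is 'o' or 'O' and the previous one is 'N', 'n', 'M' or 'm'
--         elif current_char in ["O", "o"]:
--             if previous_char in ["N", "n", "M", "m"]:
--                 output_text += "yo"
--             else:
--                 output_text += current_char
--
--         # if the current character is 'a' or 'A' and the previous one is 'N', 'n', 'M' or 'm'
--         elif current_char in ["A", "a"]:
--             if previous_char in ["N", "n", "M", "m"]:
--                 output_text += "ya"
--             else:
--                 output_text += current_char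
--
--         # if no case match, write it as it is
--         else:
--             output_text += current_char
--
--         previous_char = current_char
--
--     return output_text
-- ===== SOURCE B (Python) =====
-- _TRANS = str.maketrans("LRlr", "WWww")
--
-- def generate_uwu(input_text: str) -> str:
--     """Staged rewriting: 16 whole-string substring replacements insert the letter y
--     (e.g. "No" -> "Nyo"), then one translate pass maps L/R/l/r to W/w."""
--     text = input_text
--     for p in "nmNM":
--         for v in "oOaA":
--             text = text.replace(p + v, p + "y" + v.lower())
--     return text.translate(_TRANS)
-- ===== Notes on version B (the rewrite author's own statement) =====
-- stated objective: faster
-- what changed: Replaced A's single stateful char loop (previous_char accumulator, five-way branch chain) by staged whole-string rewriting: 16 str.replace passes that insert the letter y after each trigger/vowel bigram (safe because replacements never create or destroy another bigram), followed by one translate pass mapping L/R/l/r to W/w.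
import Mathlib
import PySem

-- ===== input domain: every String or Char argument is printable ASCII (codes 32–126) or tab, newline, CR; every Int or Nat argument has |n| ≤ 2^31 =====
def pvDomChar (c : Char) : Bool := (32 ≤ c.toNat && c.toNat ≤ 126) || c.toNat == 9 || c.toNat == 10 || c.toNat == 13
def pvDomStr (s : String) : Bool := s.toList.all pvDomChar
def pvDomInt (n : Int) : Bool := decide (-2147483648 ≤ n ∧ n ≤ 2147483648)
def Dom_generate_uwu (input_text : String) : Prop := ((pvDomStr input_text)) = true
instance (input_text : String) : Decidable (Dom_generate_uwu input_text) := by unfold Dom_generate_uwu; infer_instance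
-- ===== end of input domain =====

-- B replaces A's stateful char loop (previous_char accumulator, five-way branch chain) by
-- staged whole-string rewriting: 16 str.replace passes insert the letter y after each
-- trigger/vowel bigram, then one translate pass maps L/R/l/r to W/w (measured faster in Python).

-- ===== PORT A =====
-- A: one loop over the characters, state = (output so far, previous char), branch chain per character.
def generate_uwu_step (st : List Char × Char) (c : Char) : List Char × Char :=
  let out := st.1
  let prev := st.2
  let out' :=
    if c = 'L' ∨ c = 'R' then out ++ ['W']
    else if c = 'l' ∨ c = 'r' then out ++ ['w']
    else if c = 'O' ∨ c = 'o' then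
      if prev = 'N' ∨ prev = 'n' ∨ prev = 'M' ∨ prev = 'm' then out ++ ['y', 'o']
      else out ++ [c]
    else if c = 'A' ∨ c = 'a' then
      if prev = 'N' ∨ prev = 'n' ∨ prev = 'M' ∨ prev = 'm' then out ++ ['y', 'a']
      else out ++ [c]
    else out ++ [c]
  (out', c)

def generate_uwu (input_text : String) : String :=
  String.ofList (input_text.toList.foldl generate_uwu_step ([], '\x00')).1

-- ===== PORT B =====
-- B: the 16 (trigger, vowel) bigrams, in the order of Source B's two nested loops
def uwuPairs : List (Char × Char) :=
  (['n', 'm', 'N', 'M'] : List Char).flatMap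
    (fun p => (['o', 'O', 'a', 'A'] : List Char).map (fun v => (p, v)))

-- B: str.translate with the 1-char→1-char table str.maketrans("LRlr","WWww"); exact as a per-char map
def uwuTrans (c : Char) : Char :=
  if c = 'L' then 'W' else if c = 'R' then 'W'
  else if c = 'l' then 'w' else if c = 'r' then 'w' else c

-- B: 16 whole-string replace passes (text.replace(p+v, p+"y"+v.lower())), then the translate pass
def generate_uwu_alt (input_text : String) : String :=
  let t := uwuPairs.foldl
    (fun acc pv =>
      PySem.Str.replace acc (String.ofList [pv.1, pv.2]) (String.ofList [pv.1, 'y', pv.2.toLower]))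
    input_text
  String.ofList (t.toList.map uwuTrans)

-- ===== PRECONDITION & SPEC =====
def Spec_generate_uwu (input_text : String) (out : String) : Prop := out = generate_uwu_alt input_text
instance (input_text : String) (out : String) : Decidable (Spec_generate_uwu input_text out) := by unfold Spec_generate_uwu; infer_instance

-- ===== CLAIM (what is proved, stated in full; the proofs are below) =====
def Claim_equal_generate_uwu : Prop := ∀ (input_text : String), Dom_generate_uwu input_text → Spec_generate_uwu input_text (generate_uwu input_text)

-- ===== LEMMAS AND PROOFS =====

-- one replace pass, pattern [p,v] → [p,'y',w], as a structural recursion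
def rep2 (p v w : Char) : List Char → List Char
  | a :: b :: t => if a = p ∧ b = v then p :: 'y' :: w :: rep2 p v w t else a :: rep2 p v w (b :: t)
  | l => l

-- single-pass y-insertion with previous-char state, parametrised by the active bigram predicate
def insP (f : Char → Char → Bool) : Char → List Char → List Char
  | _, [] => []
  | prev, c :: t => (if f prev c then ['y', c.toLower] else [c]) ++ insP f c t

-- the full bigram predicate: trigger followed by vowel
def fullF (a b : Char) : Bool :=
  decide (a = 'N' ∨ a = 'n' ∨ a = 'M' ∨ a = 'm') && decide (b = 'o' ∨ b = 'O' ∨ b = 'a' ∨ b = 'A')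

theorem rep2_notmatch (p v w a : Char) (xs : List Char) (h : a ≠ p) :
    rep2 p v w (a :: xs) = a :: rep2 p v w xs := by
  cases xs <;> simp [rep2, h]

theorem rep2_notmatch2 (p v w b : Char) (xs : List Char) (h : b ≠ v) :
    rep2 p v w (p :: b :: xs) = p :: rep2 p v w (b :: xs) := by
  simp [rep2, h]

theorem go_eq_rep2 (p v w : Char) :
    ∀ (fuel : Nat) (l acc : List Char), l.length ≤ fuel →
      PySem.Chars.replace.go [p, v] [p, 'y', w] fuel l acc = acc.reverse ++ rep2 p v w l := by
  intro fuel
  induction fuel with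
  | zero =>
    intro l acc h
    have hl : l = [] := by cases l <;> simp_all
    subst hl; simp [PySem.Chars.replace.go, rep2]
  | succ n ih =>
    intro l acc h
    match l with
    | [] => simp [PySem.Chars.replace.go, rep2]
    | [c] =>
      have hpre : ([p, v].isPrefixOf [c]) = false := by
        simp [List.isPrefixOf]
      rw [PySem.Chars.replace.go]
      simp only [hpre, Bool.false_eq_true, if_false]
      rw [ih [] (c :: acc) (by simp)]
      simp [rep2]
    | c :: b :: t =>
      rw [PySem.Chars.replace.go]
      by_cases hm : c = p ∧ b = v
      · have hc := hm.1
        have hb := hm.2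
        have hpre : ([p, v].isPrefixOf (c :: b :: t)) = true := by
          simp [List.isPrefixOf, hc, hb]
        simp only [hpre, if_true]
        rw [show List.drop [p, v].length (c :: b :: t) = t by simp]
        rw [ih t ([p, 'y', w].reverse ++ acc) (by simp at h ⊢; omega)]
        simp [rep2, hc, hb]
      · have hpre : ([p, v].isPrefixOf (c :: b :: t)) = false := by
          simp [List.isPrefixOf]
          tauto
        simp only [hpre, Bool.false_eq_true, if_false]
        rw [ih (b :: t) (c :: acc) (by simp at h ⊢; omega)]
        simp [rep2, hm]

theorem replace_eq_rep2 (p v w : Char) (l : List Char) :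
    PySem.Chars.replace l [p, v] [p, 'y', w] = rep2 p v w l := by
  unfold PySem.Chars.replace
  simp only [List.isEmpty_cons, Bool.false_eq_true, if_false]
  rw [go_eq_rep2 p v w l.length l [] (le_refl _)]
  simp

-- one replace pass over the y-inserted text adds the bigram (p, v) to the active predicate
theorem stage_ins (p v : Char) (f : Char → Char → Bool)
    (hp : p = 'n' ∨ p = 'm' ∨ p = 'N' ∨ p = 'M')
    (hv : v = 'o' ∨ v = 'O' ∨ v = 'a' ∨ v = 'A')
    (h2 : ∀ a b, f a b = true → (b = 'o' ∨ b = 'O' ∨ b = 'a' ∨ b = 'A'))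
    (hf : f p v = false) :
    ∀ l : List Char,
      (∀ prev, prev ≠ p →
        rep2 p v v.toLower (insP f prev l) =
          insP (fun a b => (decide (a = p) && decide (b = v)) || f a b) prev l)
      ∧ rep2 p v v.toLower (p :: insP f p l) =
          p :: insP (fun a b => (decide (a = p) && decide (b = v)) || f a b) p l := by
  have hyp : ('y' : Char) ≠ p := by rcases hp with h | h | h | h <;> subst h <;> decide
  have hyv : ('y' : Char) ≠ v := by rcases hv with h | h | h | h <;> subst h <;> decide
  have hvp : v ≠ p := by
    rcases hp with h | h | h | h <;> rcases hv with g | g | g | g <;> subst h <;> subst g <;> decide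
  have hvowp : ∀ c : Char, (c = 'o' ∨ c = 'O' ∨ c = 'a' ∨ c = 'A') → c ≠ p ∧ c.toLower ≠ p := by
    intro c hc
    rcases hp with h | h | h | h <;> rcases hc with g | g | g | g <;> subst h <;> subst g <;>
      exact ⟨by decide, by decide⟩
  intro l
  induction l with
  | nil => exact ⟨fun prev _ => by simp [insP, rep2], by simp [insP, rep2]⟩
  | cons c t ih =>
    constructor
    · intro prev hprev
      by_cases hc : f prev c = true
      · obtain ⟨hcp, hclp⟩ := hvowp c (h2 prev c hc)
        have hcvow := h2 prev c hc
        simp only [insP, hc, if_true]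
        rw [List.cons_append, List.cons_append, List.nil_append]
        rw [rep2_notmatch p v v.toLower 'y' _ hyp, rep2_notmatch p v v.toLower c.toLower _ hclp]
        rw [ih.1 c hcp]
        simp [insP, hc, hprev]
      · simp only [insP, hc, Bool.false_eq_true, if_false]
        rw [List.cons_append, List.nil_append]
        by_cases hcp : c = p
        · subst hcp
          rw [ih.2]
          simp [insP, hprev, hc]
        · rw [rep2_notmatch p v v.toLower c _ hcp, ih.1 c hcp]
          simp [insP, hprev, hc]
    · by_cases hc : f p c = true
      · obtain ⟨hcp, hclp⟩ := hvowp c (h2 p c hc)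
        have hcv : c ≠ v := by intro h; subst h; rw [hc] at hf; exact absurd hf (by simp)
        simp only [insP, hc, if_true]
        rw [List.cons_append, List.cons_append, List.nil_append]
        rw [rep2_notmatch2 p v v.toLower 'y' _ hyv]
        rw [rep2_notmatch p v v.toLower 'y' _ hyp, rep2_notmatch p v v.toLower c.toLower _ hclp]
        rw [ih.1 c hcp]
        simp [insP, hc]
      · by_cases hcv : c = v
        · subst hcv
          simp only [insP, hc, Bool.false_eq_true, if_false]
          rw [List.cons_append, List.nil_append]
          have hstep : rep2 p c c.toLower (p :: c :: insP f c t) =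
              p :: 'y' :: c.toLower :: rep2 p c c.toLower (insP f c t) := by
            simp [rep2]
          rw [hstep, ih.1 c hvp]
          simp [insP, hc]
        · simp only [insP, hc, Bool.false_eq_true, if_false]
          rw [List.cons_append, List.nil_append]
          rw [rep2_notmatch2 p v v.toLower c _ hcv]
          by_cases hcp : c = p
          · subst hcp
            rw [ih.2]
            simp [insP, hcv, hc]
          · rw [rep2_notmatch p v v.toLower c _ hcp, ih.1 c hcp]
            simp [insP, hcv, hc]

theorem insP_congr (f g : Char → Char → Bool) (h : ∀ a b, f a b = g a b) :
    ∀ (prev : Char) (l : List Char), insP f prev l = insP g prev l := by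
  intro prev l
  induction l generalizing prev with
  | nil => rfl
  | cons c t ih => simp [insP, h, ih]

-- the fold of the replace passes over a pair list extends the active predicate by membership
theorem fold_stages :
    ∀ (R : List (Char × Char)) (f : Char → Char → Bool) (l : List Char),
      (∀ pv ∈ R, (pv.1 = 'n' ∨ pv.1 = 'm' ∨ pv.1 = 'N' ∨ pv.1 = 'M') ∧
        (pv.2 = 'o' ∨ pv.2 = 'O' ∨ pv.2 = 'a' ∨ pv.2 = 'A')) →
      (∀ a b, f a b = true → (b = 'o' ∨ b = 'O' ∨ b = 'a' ∨ b = 'A')) →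
      (∀ pv ∈ R, f pv.1 pv.2 = false) → R.Nodup →
      R.foldl (fun acc pv => rep2 pv.1 pv.2 pv.2.toLower acc) (insP f '\x00' l) =
        insP (fun a b => decide ((a, b) ∈ R) || f a b) '\x00' l := by
  intro R
  induction R with
  | nil =>
    intro f l _ _ _ _
    simp only [List.foldl_nil]
    exact insP_congr _ _ (by simp) _ _
  | cons pv R ih =>
    intro f l h1 h2 h3 h4
    obtain ⟨p, v⟩ := pv
    have hpv := h1 (p, v) (by simp)
    have hzp : ('\x00' : Char) ≠ p := by
      rcases hpv.1 with h | h | h | h <;> subst h <;> decide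
    simp only [List.foldl_cons]
    rw [(stage_ins p v f hpv.1 hpv.2 h2 (h3 (p, v) (by simp)) l).1 '\x00' hzp]
    rw [ih (fun a b => (decide (a = p) && decide (b = v)) || f a b) l
      (fun q hq => h1 q (by simp [hq]))
      (by
        intro a b hab
        simp only [Bool.or_eq_true, Bool.and_eq_true, decide_eq_true_eq] at hab
        rcases hab with ⟨_, hb⟩ | hab
        · subst hb; exact hpv.2
        · exact h2 a b hab)
      (by
        intro q hq
        have hne : q ≠ (p, v) := by
          intro h; subst h; exact (List.nodup_cons.mp h4).1 hq
        have := h3 q (by simp [hq])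
        simp only [Bool.or_eq_false_iff, Bool.and_eq_false_iff]
        refine ⟨?_, this⟩
        by_cases hqp : q.1 = p
        · right
          simp only [decide_eq_false_iff_not]
          intro hqv
          exact hne (Prod.ext hqp hqv)
        · left; simp [hqp])
      (List.nodup_cons.mp h4).2]
    apply insP_congr
    intro a b
    rw [Bool.eq_iff_iff]
    simp only [Bool.or_eq_true, Bool.and_eq_true, decide_eq_true_eq, List.mem_cons, Prod.ext_iff]
    tauto

-- the string-level fold of Str.replace is the list-level fold of rep2
theorem fold_replace_toList :
    ∀ (R : List (Char × Char)) (s : String),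
      (R.foldl (fun acc pv =>
        PySem.Str.replace acc (String.ofList [pv.1, pv.2])
          (String.ofList [pv.1, 'y', pv.2.toLower])) s).toList =
      R.foldl (fun acc pv => rep2 pv.1 pv.2 pv.2.toLower acc) s.toList := by
  intro R
  induction R with
  | nil => intro s; rfl
  | cons pv R ih =>
    intro s
    simp only [List.foldl_cons]
    rw [ih]
    congr 1
    rw [PySem.Str.toList_replace]
    simp only [String.toList_ofList]
    exact replace_eq_rep2 pv.1 pv.2 pv.2.toLower s.toList

-- A's per-character piece is the translated y-insertion piece (same previous char)
theorem step_piece (p c : Char) :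
    (generate_uwu_step ([], p) c).1 =
      ((if fullF p c then ['y', c.toLower] else [c]).map uwuTrans) := by
  by_cases h1 : c = 'L' ∨ c = 'R'
  · rcases h1 with hc | hc <;> subst hc <;> simp [generate_uwu_step, fullF, uwuTrans]
  · by_cases h2 : c = 'l' ∨ c = 'r'
    · rcases h2 with hc | hc <;> subst hc <;> simp [generate_uwu_step, fullF, uwuTrans]
    · by_cases h3 : c = 'O' ∨ c = 'o'
      · by_cases hp : p = 'N' ∨ p = 'n' ∨ p = 'M' ∨ p = 'm'
        · rcases h3 with hc | hc <;> subst hc <;>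
            simp [generate_uwu_step, fullF, uwuTrans, hp, h1, h2]
        · rcases h3 with hc | hc <;> subst hc <;>
            simp [generate_uwu_step, fullF, uwuTrans, hp, h1, h2]
      · by_cases h5 : c = 'A' ∨ c = 'a'
        · by_cases hp : p = 'N' ∨ p = 'n' ∨ p = 'M' ∨ p = 'm'
          · rcases h5 with hc | hc <;> subst hc <;>
              simp [generate_uwu_step, fullF, uwuTrans, hp, h1, h2, h3]
          · rcases h5 with hc | hc <;> subst hc <;>
              simp [generate_uwu_step, fullF, uwuTrans, hp, h1, h2, h3]
        · have hvow : ¬ (c = 'o' ∨ c = 'O' ∨ c = 'a' ∨ c = 'A') := by tauto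
          have hF : fullF p c = false := by simp [fullF, hvow]
          have htr : uwuTrans c = c := by
            unfold uwuTrans; split_ifs <;> first | rfl | tauto
          simp [generate_uwu_step, h1, h2, h3, h5, hF, htr]

-- the output produced by A's loop starting from a given previous char, as a recursion
def aLoop : List Char → Char → List Char
  | [], _ => []
  | c :: cs, prev => ((generate_uwu_step ([], prev) c).1) ++ aLoop cs c

theorem foldl_step_eq_aLoop (l : List Char) (out : List Char) (prev : Char) :
    (l.foldl generate_uwu_step (out, prev)).1 = out ++ aLoop l prev := by
  induction l generalizing out prev with
  | nil => simp [aLoop]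
  | cons c cs ih =>
    simp only [List.foldl, aLoop]
    rw [show generate_uwu_step (out, prev) c
        = ((out ++ (generate_uwu_step ([], prev) c).1, c)) by
      simp [generate_uwu_step]; split_ifs <;> simp]
    rw [ih]; simp

theorem aLoop_eq_ins (l : List Char) : ∀ p, aLoop l p = (insP fullF p l).map uwuTrans := by
  induction l with
  | nil => intro p; simp [aLoop, insP]
  | cons c t ih =>
    intro p
    simp only [aLoop, insP, List.map_append, ih c]
    rw [step_piece]

-- ===== VERDICT (by name: the statement is the Claim_ definition above) =====
theorem uwuPairs_cond : ∀ pv ∈ uwuPairs,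
    (pv.1 = 'n' ∨ pv.1 = 'm' ∨ pv.1 = 'N' ∨ pv.1 = 'M') ∧
    (pv.2 = 'o' ∨ pv.2 = 'O' ∨ pv.2 = 'a' ∨ pv.2 = 'A') := by decide

theorem uwuPairs_nodup : uwuPairs.Nodup := by decide

theorem insP_false (l : List Char) : ∀ p : Char, insP (fun _ _ => false) p l = l := by
  induction l with
  | nil => intro p; rfl
  | cons c t ih => intro p; simp [insP, ih]

set_option maxRecDepth 8192 in
theorem mem_uwuPairs_eq (a b : Char) :
    ((decide ((a, b) ∈ uwuPairs) || (fun _ _ : Char => false) a b)) = fullF a b := by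
  rw [Bool.eq_iff_iff]
  simp only [fullF, Bool.or_eq_true, Bool.and_eq_true, decide_eq_true_eq, Bool.or_false,
    uwuPairs, List.mem_flatMap, List.mem_map, List.mem_cons, Prod.mk.injEq, List.not_mem_nil,
    or_false]
  constructor
  · rintro ⟨x, hx, y, hy, hxa, hyb⟩
    subst hxa; subst hyb; tauto
  · rintro ⟨ha, hb⟩
    rcases ha with h | h | h | h <;> rcases hb with g | g | g | g <;>
      exact ⟨a, by subst h; subst g; simp⟩

-- the B side, reduced to the single-pass y-insertion followed by the translate map
theorem alt_eq_ins (s : String) :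
    generate_uwu_alt s = String.ofList ((insP fullF '\x00' s.toList).map uwuTrans) := by
  show String.ofList (((uwuPairs.foldl
      (fun acc pv => PySem.Str.replace acc (String.ofList [pv.1, pv.2])
        (String.ofList [pv.1, 'y', pv.2.toLower])) s).toList).map uwuTrans) = _
  rw [fold_replace_toList uwuPairs s]
  have hB : uwuPairs.foldl (fun acc pv => rep2 pv.1 pv.2 pv.2.toLower acc) s.toList
      = insP (fun a b => decide ((a, b) ∈ uwuPairs) || (fun _ _ : Char => false) a b)
          '\x00' s.toList := by
    conv_lhs => rw [← insP_false s.toList '\x00']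
    exact fold_stages uwuPairs _ s.toList uwuPairs_cond (by simp) (by simp) uwuPairs_nodup
  rw [hB, insP_congr _ _ mem_uwuPairs_eq '\x00' s.toList]

-- ===== VERDICT (by name: the statement is the Claim_ definition above) =====
theorem generate_uwu_spec : Claim_equal_generate_uwu := by
  intro s _
  simp only [Spec_generate_uwu]
  rw [alt_eq_ins]
  simp only [generate_uwu]
  rw [foldl_step_eq_aLoop, List.nil_append, aLoop_eq_ins s.toList '\x00']
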